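-- pv_equiv track=rewrite | github.com/ScopeFoundry/ScopeFoundry | sweeping/sweep_4D_modes.py | mk_indices_gen
-- ===== SOURCE A (Python) =====
-- def mk_indices_gen(ar_1, ar_2, ar_3, ar_4, mode="nested"):
--     if mode == "nested":
--         for k, v in enumerate(ar_1):
--             for l, v in enumerate(ar_2):
--                 for m, v in enumerate(ar_3):
--                     for n, v in enumerate(ar_4):
--                         yield k, l, m, n
--
--     elif mode == "co-move":
--         for n, v in enumerate(ar_4):
--             yield 0, 0, 0, n
--
--     elif mode == "1,2_nested_3,4_co-move":
--         for k, v in enumerate(ar_1):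
--             for l, v in enumerate(ar_2):
--                 for n, v in enumerate(ar_4):
--                     yield k, l, 0, n
-- ===== SOURCE B (Python) =====
-- def mk_indices_gen(ar_1, ar_2, ar_3, ar_4, mode="nested"):
--     # Mixed-radix decoding: pick per-mode digit sizes (1 = pinned axis), then
--     # decode a single flat counter with divmod instead of nesting loops.
--     if mode == "nested":
--         dims = (len(ar_1), len(ar_2), len(ar_3), len(ar_4))
--     elif mode == "co-move":
--         dims = (1, 1, 1, len(ar_4))
--     elif mode == "1,2_nested_3,4_co-move":
--         dims = (len(ar_1), len(ar_2), 1, len(ar_4))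
--     else:
--         return
--     d1, d2, d3, d4 = dims
--     for i in range(d1 * d2 * d3 * d4):
--         i, n = divmod(i, d4)
--         i, m = divmod(i, d3)
--         k, l = divmod(i, d2)
--         yield k, l, m, n
-- ===== Notes on version B (the rewrite author's own statement) =====
-- stated objective: alternative
-- what changed: Replaces the per-mode nested enumerate loops by mixed-radix decoding: each mode only chooses a tuple of digit sizes (1 for a pinned axis), and one shared flat loop over range(d1*d2*d3*d4) recovers (k,l,m,n) from the counter with divmod; unknown modes still yield nothing.
import Mathlib
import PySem

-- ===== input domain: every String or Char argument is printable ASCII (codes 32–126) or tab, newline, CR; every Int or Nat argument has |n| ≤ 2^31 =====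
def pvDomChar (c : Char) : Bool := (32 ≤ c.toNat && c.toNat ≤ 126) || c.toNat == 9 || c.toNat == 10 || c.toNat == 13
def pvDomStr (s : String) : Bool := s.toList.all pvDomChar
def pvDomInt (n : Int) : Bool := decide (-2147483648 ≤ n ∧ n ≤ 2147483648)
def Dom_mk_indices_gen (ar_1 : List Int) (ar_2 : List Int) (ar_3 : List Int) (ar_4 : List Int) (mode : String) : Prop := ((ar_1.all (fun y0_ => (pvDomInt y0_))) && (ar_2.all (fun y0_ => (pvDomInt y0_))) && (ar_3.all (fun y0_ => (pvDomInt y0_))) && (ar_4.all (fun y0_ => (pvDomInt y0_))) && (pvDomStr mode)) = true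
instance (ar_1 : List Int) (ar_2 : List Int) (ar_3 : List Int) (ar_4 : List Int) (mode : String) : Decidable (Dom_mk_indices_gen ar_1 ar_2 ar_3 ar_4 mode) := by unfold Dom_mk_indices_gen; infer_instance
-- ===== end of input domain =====

-- B replaces the per-mode nested loops by one flat counter with mixed-radix divmod decoding (alternative decomposition, same cost).

-- ===== PORT A =====
-- Port of A: nested for-loops over enumerate, yielding index tuples; unknown mode yields nothing.
def mk_indices_gen (ar_1 : List Int) (ar_2 : List Int) (ar_3 : List Int) (ar_4 : List Int) (mode : String) : List (Int × Int × Int × Int) :=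
  if mode = "nested" then
    (PySem.List.enumerate ar_1).flatMap (fun kv =>
      (PySem.List.enumerate ar_2).flatMap (fun lv =>
        (PySem.List.enumerate ar_3).flatMap (fun mv =>
          (PySem.List.enumerate ar_4).map (fun nv =>
            (kv.1, lv.1, mv.1, nv.1)))))
  else if mode = "co-move" then
    (PySem.List.enumerate ar_4).map (fun nv => (0, 0, 0, nv.1))
  else if mode = "1,2_nested_3,4_co-move" then
    (PySem.List.enumerate ar_1).flatMap (fun kv =>
      (PySem.List.enumerate ar_2).flatMap (fun lv =>
        (PySem.List.enumerate ar_4).map (fun nv =>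
          (kv.1, lv.1, 0, nv.1))))
  else []

-- ===== PORT B =====
-- B's shared flat loop: for i in range(d1*d2*d3*d4), decode (k,l,m,n) by divmod.
-- divmod is ported as floordiv/mod (exact here: the loop body only runs when every
-- digit size is positive, so the Python divmod never sees a zero divisor).
def pvDecodeLoop (d1 d2 d3 d4 : Int) : List (Int × Int × Int × Int) :=
  (PySem.List.pyRange 0 (d1 * d2 * d3 * d4) 1).map (fun i =>
    let n := PySem.Int.mod i d4
    let i1 := PySem.Int.floordiv i d4
    let m := PySem.Int.mod i1 d3
    let i2 := PySem.Int.floordiv i1 d3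
    let l := PySem.Int.mod i2 d2
    let k := PySem.Int.floordiv i2 d2
    (k, l, m, n))

def mk_indices_gen_alt (ar_1 : List Int) (ar_2 : List Int) (ar_3 : List Int) (ar_4 : List Int) (mode : String) : List (Int × Int × Int × Int) :=
  if mode = "nested" then
    pvDecodeLoop (ar_1.length : Int) (ar_2.length : Int) (ar_3.length : Int) (ar_4.length : Int)
  else if mode = "co-move" then
    pvDecodeLoop 1 1 1 (ar_4.length : Int)
  else if mode = "1,2_nested_3,4_co-move" then
    pvDecodeLoop (ar_1.length : Int) (ar_2.length : Int) 1 (ar_4.length : Int)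
  else []

-- ===== PRECONDITION & SPEC =====
def Spec_mk_indices_gen (ar_1 : List Int) (ar_2 : List Int) (ar_3 : List Int) (ar_4 : List Int) (mode : String) (out : List (Int × Int × Int × Int)) : Prop := out = mk_indices_gen_alt ar_1 ar_2 ar_3 ar_4 mode
instance (ar_1 : List Int) (ar_2 : List Int) (ar_3 : List Int) (ar_4 : List Int) (mode : String) (out : List (Int × Int × Int × Int)) : Decidable (Spec_mk_indices_gen ar_1 ar_2 ar_3 ar_4 mode out) := by unfold Spec_mk_indices_gen; infer_instance

-- ===== CLAIM =====
def Claim_equal_mk_indices_gen : Prop := ∀ (ar_1 : List Int) (ar_2 : List Int) (ar_3 : List Int) (ar_4 : List Int) (mode : String), Dom_mk_indices_gen ar_1 ar_2 ar_3 ar_4 mode → Spec_mk_indices_gen ar_1 ar_2 ar_3 ar_4 mode (mk_indices_gen ar_1 ar_2 ar_3 ar_4 mode)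

-- ===== LEMMAS AND PROOFS =====

-- the common normal form: nested Nat-range flatMaps
def pvNested (L1 L2 L3 L4 : Nat) : List (Int × Int × Int × Int) :=
  (List.range L1).flatMap (fun k : Nat =>
    (List.range L2).flatMap (fun l : Nat =>
      (List.range L3).flatMap (fun m : Nat =>
        (List.range L4).map (fun n : Nat => ((k : Int), (l : Int), (m : Int), (n : Int))))))

-- one mixed-radix digit peeled off a flat Nat range
theorem pv_decode_step {β : Type} (a b : Nat) (g : Nat → Nat → List β) :
    (List.range (a * b)).flatMap (fun i => g (i / b) (i % b)) =
      (List.range a).flatMap (fun q => (List.range b).flatMap (g q)) := by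
  induction a with
  | zero => simp
  | succ a ih =>
    rcases Nat.eq_zero_or_pos b with hb | hb
    · subst hb; simp
    · rw [Nat.succ_mul, List.range_add, List.flatMap_append, ih, List.flatMap_map,
        List.range_succ, List.flatMap_append]
      congr 1
      simp only [List.flatMap_singleton]
      have h : ∀ j ∈ List.range b,
          g ((a * b + j) / b) ((a * b + j) % b) = g a j := by
        intro j hj
        have hjb : j < b := List.mem_range.mp hj
        rw [Nat.add_comm (a * b) j, Nat.add_mul_div_right _ _ hb,
          Nat.add_mul_mod_self_right, Nat.div_eq_of_lt hjb, Nat.mod_eq_of_lt hjb,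
          Nat.zero_add]
      rw [List.flatMap_def, List.flatMap_def, List.map_congr_left h]

-- three applications of pv_decode_step: full 4-digit mixed-radix decoding
theorem pv_decode4 {β : Type} (D1 D2 D3 D4 : Nat) (f : Nat → Nat → Nat → Nat → β) :
    (List.range (D1 * D2 * D3 * D4)).flatMap (fun j =>
        [f (j / D4 / D3 / D2) (j / D4 / D3 % D2) (j / D4 % D3) (j % D4)]) =
      (List.range D1).flatMap (fun k =>
        (List.range D2).flatMap (fun l =>
          (List.range D3).flatMap (fun m =>
            (List.range D4).map (f k l m)))) := by
  calc (List.range (D1 * D2 * D3 * D4)).flatMap (fun j =>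
          [f (j / D4 / D3 / D2) (j / D4 / D3 % D2) (j / D4 % D3) (j % D4)])
      = (List.range (D1 * D2 * D3)).flatMap (fun q =>
          (List.range D4).flatMap (fun n =>
            [f (q / D3 / D2) (q / D3 % D2) (q % D3) n])) :=
        pv_decode_step (D1 * D2 * D3) D4
          (fun q n => [f (q / D3 / D2) (q / D3 % D2) (q % D3) n])
    _ = (List.range (D1 * D2)).flatMap (fun q2 =>
          (List.range D3).flatMap (fun m =>
            (List.range D4).flatMap (fun n =>
              [f (q2 / D2) (q2 % D2) m n]))) :=
        pv_decode_step (D1 * D2) D3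
          (fun q2 m => (List.range D4).flatMap (fun n => [f (q2 / D2) (q2 % D2) m n]))
    _ = (List.range D1).flatMap (fun k =>
          (List.range D2).flatMap (fun l =>
            (List.range D3).flatMap (fun m =>
              (List.range D4).flatMap (fun n => [f k l m n])))) :=
        pv_decode_step D1 D2
          (fun k l => (List.range D3).flatMap (fun m =>
            (List.range D4).flatMap (fun n => [f k l m n])))
    _ = _ := by simp only [← List.map_eq_flatMap]

-- B's decode loop over Nat digit sizes equals the nested normal form
theorem pv_decodeLoop_eq (D1 D2 D3 D4 : Nat) :
    pvDecodeLoop (D1 : Int) (D2 : Int) (D3 : Int) (D4 : Int) = pvNested D1 D2 D3 D4 := by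
  unfold pvDecodeLoop pvNested
  have hcast : ((D1 : Int) * D2 * D3 * D4) = ((D1 * D2 * D3 * D4 : Nat) : Int) := by
    push_cast; ring
  rw [hcast, PySem.List.pyRange_zero_natCast, List.map_map]
  have hmap : ∀ j ∈ List.range (D1 * D2 * D3 * D4),
      ((fun i : Int =>
        (PySem.Int.floordiv (PySem.Int.floordiv (PySem.Int.floordiv i (D4 : Int)) (D3 : Int)) (D2 : Int),
         PySem.Int.mod (PySem.Int.floordiv (PySem.Int.floordiv i (D4 : Int)) (D3 : Int)) (D2 : Int),
         PySem.Int.mod (PySem.Int.floordiv i (D4 : Int)) (D3 : Int),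
         PySem.Int.mod i (D4 : Int))) ∘ (fun k : Nat => (k : Int))) j =
      (fun j : Nat =>
        (((j / D4 / D3 / D2 : Nat) : Int), ((j / D4 / D3 % D2 : Nat) : Int),
         ((j / D4 % D3 : Nat) : Int), ((j % D4 : Nat) : Int))) j := by
    intro j _
    simp only [Function.comp_apply]
    rw [PySem.Int.floordiv_natCast j D4, PySem.Int.mod_natCast j D4,
      PySem.Int.floordiv_natCast (j / D4) D3, PySem.Int.mod_natCast (j / D4) D3,
      PySem.Int.floordiv_natCast (j / D4 / D3) D2, PySem.Int.mod_natCast (j / D4 / D3) D2]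
  rw [List.map_congr_left hmap, List.map_eq_flatMap]
  exact pv_decode4 D1 D2 D3 D4 (fun k l m n => ((k : Int), (l : Int), (m : Int), (n : Int)))

-- A's enumerate chains use only the index: reduce to Nat ranges
theorem pv_flatMap_enum {β : Type} (xs : List Int) (f : Int → List β) :
    (PySem.List.enumerate xs).flatMap (fun p => f p.1) =
      (List.range xs.length).flatMap (fun k : Nat => f (k : Int)) := by
  calc (PySem.List.enumerate xs).flatMap (fun p => f p.1)
      = ((PySem.List.enumerate xs).map (fun p => p.1)).flatMap f := by
        rw [List.flatMap_map]
    _ = (PySem.List.pyRange 0 (0 + xs.length) 1).flatMap f := by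
        rw [PySem.List.map_fst_enumerate]
    _ = ((List.range xs.length).map (fun k : Nat => (k : Int))).flatMap f := by
        rw [show ((0 : Int) + (xs.length : Int)) = ((xs.length : Nat) : Int) by omega,
          PySem.List.pyRange_zero_natCast xs.length]
    _ = _ := by rw [List.flatMap_map]

theorem pv_map_enum {β : Type} (xs : List Int) (f : Int → β) :
    (PySem.List.enumerate xs).map (fun p => f p.1) =
      (List.range xs.length).map (fun k : Nat => f (k : Int)) := by
  have h := pv_flatMap_enum xs (fun x => [f x])
  simpa only [← List.map_eq_flatMap] using h

-- ===== VERDICT =====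
theorem mk_indices_gen_spec : Claim_equal_mk_indices_gen := by
  intro ar_1 ar_2 ar_3 ar_4 mode _
  unfold Spec_mk_indices_gen mk_indices_gen mk_indices_gen_alt
  split_ifs
  · rw [pv_decodeLoop_eq ar_1.length ar_2.length ar_3.length ar_4.length]
    rw [pv_flatMap_enum ar_1 (fun k =>
        (PySem.List.enumerate ar_2).flatMap (fun lv =>
          (PySem.List.enumerate ar_3).flatMap (fun mv =>
            (PySem.List.enumerate ar_4).map (fun nv => (k, lv.1, mv.1, nv.1)))))]
    unfold pvNested
    congr 1; funext k
    rw [pv_flatMap_enum ar_2 (fun l =>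
        (PySem.List.enumerate ar_3).flatMap (fun mv =>
          (PySem.List.enumerate ar_4).map (fun nv => ((k : Int), l, mv.1, nv.1))))]
    congr 1; funext l
    rw [pv_flatMap_enum ar_3 (fun m =>
        (PySem.List.enumerate ar_4).map (fun nv => ((k : Int), (l : Int), m, nv.1)))]
    congr 1; funext m
    exact pv_map_enum ar_4 (fun n => ((k : Int), (l : Int), (m : Int), n))
  · rw [show (1 : Int) = ((1 : Nat) : Int) from rfl, pv_decodeLoop_eq 1 1 1 ar_4.length]
    rw [pv_map_enum ar_4 (fun n => ((0 : Int), (0 : Int), (0 : Int), n))]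
    simp [pvNested]
  · rw [show (1 : Int) = ((1 : Nat) : Int) from rfl,
      pv_decodeLoop_eq ar_1.length ar_2.length 1 ar_4.length]
    rw [pv_flatMap_enum ar_1 (fun k =>
        (PySem.List.enumerate ar_2).flatMap (fun lv =>
          (PySem.List.enumerate ar_4).map (fun nv => (k, lv.1, 0, nv.1))))]
    unfold pvNested
    congr 1; funext k
    rw [pv_flatMap_enum ar_2 (fun l =>
        (PySem.List.enumerate ar_4).map (fun nv => ((k : Int), l, 0, nv.1)))]
    congr 1; funext l
    rw [pv_map_enum ar_4 (fun n => ((k : Int), (l : Int), (0 : Int), n))]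
    simp
  · rfl
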